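-- pv_equiv track=rewrite | github.com/sergunow/belief-propagation | graph_manipulation.py | build_graph_of_cliques
-- ===== SOURCE A (Python) =====
-- def build_graph_of_cliques(maximal_cliques):
--     C = []
--
--     nr_cliques = len(maximal_cliques)
--
--     #Check the connectivity between all cliques
--     for i in range(nr_cliques - 1):
--         for j in range(i + 1, nr_cliques):
--             intersection = len(list(set(maximal_cliques[i]).intersection(
--                 set(maximal_cliques[j]))))
--
--             if intersection > 0:
--                 #Intersection means an edge between the two nodes
--                 C.append((maximal_cliques[i],
--                     maximal_cliques[j], intersection))
--
--     #Sort the graph by the number of connectivity variables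
--     C.sort(key = lambda node: node[2], reverse = True)
--
--     return C
-- ===== SOURCE B (Python) =====
-- def build_graph_of_cliques(maximal_cliques):
--     n = len(maximal_cliques)
--
--     # Inverted index: variable -> (increasing) list of clique indices containing it
--     occ = {}
--     for idx, clique in enumerate(maximal_cliques):
--         for v in dict.fromkeys(clique):
--             occ.setdefault(v, []).append(idx)
--
--     # Pairwise overlap counts, accumulated only over co-occurring clique pairs
--     counts = {}
--     for idxs in occ.values():
--         for a in range(len(idxs)):
--             i = idxs[a]
--             for j in idxs[a + 1:]:
--                 counts[(i, j)] = counts.get((i, j), 0) + 1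
--
--     # Emit edges in the same (i, j) order A appends them, weight = overlap count
--     C = []
--     for i in range(n - 1):
--         for j in range(i + 1, n):
--             if (i, j) in counts:
--                 C.append((maximal_cliques[i], maximal_cliques[j], counts[(i, j)]))
--
--     C.sort(key=lambda node: node[2], reverse=True)
--
--     return C
-- ===== Notes on version B (the rewrite author's own statement) =====
-- stated objective: faster
-- what changed: Instead of materialising two Python sets and intersecting them for every one of the O(n^2) clique pairs, B builds an inverted index variable->cliques once, accumulates the pairwise overlap counts only over co-occurring clique pairs, and then emits the edges with a cheap O(1)-per-pair dictionary sweep before the same stable sort.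
import Mathlib
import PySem

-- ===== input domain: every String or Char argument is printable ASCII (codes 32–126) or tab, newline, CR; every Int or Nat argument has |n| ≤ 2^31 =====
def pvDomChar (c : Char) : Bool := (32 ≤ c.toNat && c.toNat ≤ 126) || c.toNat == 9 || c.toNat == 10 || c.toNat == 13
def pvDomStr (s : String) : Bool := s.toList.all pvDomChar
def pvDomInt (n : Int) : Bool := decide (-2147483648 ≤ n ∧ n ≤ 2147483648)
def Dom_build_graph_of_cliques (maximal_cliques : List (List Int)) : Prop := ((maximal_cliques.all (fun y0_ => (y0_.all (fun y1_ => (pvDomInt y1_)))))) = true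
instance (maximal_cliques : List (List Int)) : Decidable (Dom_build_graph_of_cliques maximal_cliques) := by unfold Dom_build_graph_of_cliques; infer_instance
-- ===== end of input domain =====

-- B replaces A's per-pair set intersections by an inverted index (variable -> cliques),
-- accumulating overlap counts only for co-occurring clique pairs; return value only, no mutation.

-- ===== PORT A =====
-- faithful transliteration of A; maximal_cliques[i]/[j] are always in range here, so pyGetD is exact
def build_graph_of_cliques (maximal_cliques : List (List Int)) : List (List Int × List Int × Int) :=
  let nr_cliques : Int := PySem.List.len maximal_cliques
  let C : List (List Int × List Int × Int) :=
    (PySem.List.pyRange 0 (nr_cliques - 1) 1).foldl (fun C i =>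
      (PySem.List.pyRange (i + 1) nr_cliques 1).foldl (fun C j =>
        let intersection : Int :=
          PySem.List.len (PySem.Set.inter
            (PySem.Set.ofList (PySem.List.pyGetD maximal_cliques i []))
            (PySem.Set.ofList (PySem.List.pyGetD maximal_cliques j [])))
        if intersection > 0 then
          C ++ [(PySem.List.pyGetD maximal_cliques i [],
                 PySem.List.pyGetD maximal_cliques j [], intersection)]
        else C) C) []
  PySem.List.sorted C (fun node => node.2.2) true

-- ===== PORT B =====
-- transliteration of Source B; list indexing is always in range here, so pyGetD is exact,
-- and counts[(i, j)] is only read on keys present in counts, so getD is exact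
def build_graph_of_cliques_alt (maximal_cliques : List (List Int)) : List (List Int × List Int × Int) :=
  let n : Int := PySem.List.len maximal_cliques
  let occ : PySem.Dict Int (List Int) :=
    (PySem.List.enumerate maximal_cliques).foldl (fun occ p =>
      (PySem.List.dedup p.2).foldl (fun occ v => occ.modify v [] (· ++ [p.1])) occ)
      PySem.Dict.empty
  let counts : PySem.Dict (Int × Int) Int :=
    occ.values.foldl (fun counts idxs =>
      (PySem.List.pyRange 0 (PySem.List.len idxs) 1).foldl (fun counts a =>
        let i := PySem.List.pyGetD idxs a 0
        (PySem.List.slice idxs (some (a + 1)) none).foldl (fun counts j =>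
          counts.modify (i, j) 0 (· + 1)) counts) counts)
      PySem.Dict.empty
  let C : List (List Int × List Int × Int) :=
    (PySem.List.pyRange 0 (n - 1) 1).foldl (fun C i =>
      (PySem.List.pyRange (i + 1) n 1).foldl (fun C j =>
        if counts.contains (i, j) then
          C ++ [(PySem.List.pyGetD maximal_cliques i [],
                 PySem.List.pyGetD maximal_cliques j [],
                 counts.getD (i, j) 0)]
        else C) C) []
  PySem.List.sorted C (fun node => node.2.2) true

-- ===== PRECONDITION & SPEC =====
def Spec_build_graph_of_cliques (maximal_cliques : List (List Int)) (out : List (List Int × List Int × Int)) : Prop := out = build_graph_of_cliques_alt maximal_cliques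
instance (maximal_cliques : List (List Int)) (out : List (List Int × List Int × Int)) : Decidable (Spec_build_graph_of_cliques maximal_cliques out) := by unfold Spec_build_graph_of_cliques; infer_instance

-- ===== CLAIM (what is proved, stated in full; the proofs are below) =====
def Claim_equal_build_graph_of_cliques : Prop := ∀ (maximal_cliques : List (List Int)), Dom_build_graph_of_cliques maximal_cliques → Spec_build_graph_of_cliques maximal_cliques (build_graph_of_cliques maximal_cliques)

-- ===== LEMMAS AND PROOFS =====

-- proof-side abbreviations for the pieces of the two programs
def pvN (mc : List (List Int)) : Int := PySem.List.len mc
def pvC (mc : List (List Int)) (i : Int) : List Int := PySem.List.pyGetD mc i []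
def pvInter (mc : List (List Int)) (i j : Int) : Int :=
  PySem.List.len (PySem.Set.inter (PySem.Set.ofList (pvC mc i)) (PySem.Set.ofList (pvC mc j)))
-- the (increasing) list of clique indices whose clique contains v
def pvIdxs (mc : List (List Int)) (v : Int) : List Int :=
  (PySem.List.pyRange 0 (pvN mc) 1).filter (fun i => decide (v ∈ pvC mc i))
-- the flattened (variable, clique-index) stream B's first loop processes
def pvL (mc : List (List Int)) : List (Int × Int) :=
  (PySem.List.enumerate mc).flatMap (fun p => (PySem.List.dedup p.2).map (fun v => (v, p.1)))
def pvOcc (mc : List (List Int)) : PySem.Dict Int (List Int) :=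
  (PySem.List.enumerate mc).foldl (fun occ p =>
    (PySem.List.dedup p.2).foldl (fun occ v => occ.modify v [] (· ++ [p.1])) occ)
    PySem.Dict.empty
-- the pair stream B's second loop generates from one index list
def pairsOf (idxs : List Int) : List (Int × Int) :=
  (PySem.List.pyRange 0 (PySem.List.len idxs) 1).flatMap (fun a =>
    (PySem.List.slice idxs (some (a + 1)) none).map (fun j => (PySem.List.pyGetD idxs a 0, j)))
-- the same stream, structurally
def pairsRec : List Int → List (Int × Int)
  | [] => []
  | x :: t => t.map (fun j => (x, j)) ++ pairsRec t
def pvCounts (mc : List (List Int)) : PySem.Dict (Int × Int) Int :=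
  (pvOcc mc).values.foldl (fun counts idxs =>
    (PySem.List.pyRange 0 (PySem.List.len idxs) 1).foldl (fun counts a =>
      let i := PySem.List.pyGetD idxs a 0
      (PySem.List.slice idxs (some (a + 1)) none).foldl (fun counts j =>
        counts.modify (i, j) 0 (· + 1)) counts) counts)
    PySem.Dict.empty
def pvBL (mc : List (List Int)) : List (Int × Int) := ((pvOcc mc).values).flatMap pairsOf

-- small generic lemmas
theorem pv_flatMap_ite_singleton {α : Type} (p : α → Prop) [DecidablePred p] (l : List α) :
    l.flatMap (fun x => if p x then [x] else []) = l.filter (fun x => decide (p x)) := by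
  induction l with
  | nil => rfl
  | cons x t ih => by_cases h : p x <;> simp [List.flatMap_cons, h, ih]

theorem pv_count_flatMap {α β : Type} [BEq β] (l : List α) (g : α → List β) (q : β) :
    ((l.flatMap g).count q) = (l.map (fun x => (g x).count q)).sum := by
  induction l with
  | nil => rfl
  | cons x t ih => simp [List.flatMap_cons, List.count_append, ih]

theorem pv_sum_ite_eq_countP {α : Type} (p : α → Prop) [DecidablePred p] (l : List α) :
    (l.map (fun x => if p x then (1 : Nat) else 0)).sum = l.countP (fun x => decide (p x)) := by
  induction l with
  | nil => rfl
  | cons x t ih => by_cases h : p x <;> simp [h, ih, Nat.add_comm]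

-- occ characterisation
theorem pvOcc_eq_foldl (mc : List (List Int)) :
    pvOcc mc = (pvL mc).foldl (fun d p => d.modify p.1 [] (· ++ [p.2])) PySem.Dict.empty := by
  unfold pvOcc pvL
  rw [List.foldl_flatMap]
  apply PySem.List.foldl_congr_mem
  intro acc x _
  rw [List.foldl_map]

theorem pvOcc_getD (mc : List (List Int)) (v : Int) :
    (pvOcc mc).getD v [] = pvIdxs mc v := by
  rw [pvOcc_eq_foldl, PySem.Dict.getD_foldl_modify_append, PySem.Dict.getD_empty,
    List.nil_append]
  unfold pvL
  rw [List.filter_flatMap, List.map_flatMap, PySem.List.enumerate_eq_map_pyRange mc [],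
    List.flatMap_map]
  unfold pvIdxs
  rw [← pv_flatMap_ite_singleton (fun i => v ∈ pvC mc i) (PySem.List.pyRange 0 (pvN mc) 1)]
  have hn : pvN mc = PySem.List.len mc := rfl
  rw [← hn]
  congr 1
  funext i
  rw [List.filter_map, List.map_map]
  have h1 : ((fun (p : Int × Int) => p.1 == v) ∘ fun v' => (v', (i, PySem.List.pyGetD mc i []).1)) = fun v' => v' == v := rfl
  have h2 : ((fun (p : Int × Int) => p.2) ∘ fun v' => (v', (i, PySem.List.pyGetD mc i []).1)) = fun _ => (i, PySem.List.pyGetD mc i []).1 := rfl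
  rw [h1, h2, List.filter_beq]
  by_cases hv : v ∈ pvC mc i
  · have hv' : v ∈ PySem.List.dedup (i, PySem.List.pyGetD mc i []).2 := by
      rw [PySem.List.mem_dedup]; exact hv
    rw [List.count_eq_one_of_mem (PySem.List.nodup_dedup _) hv', if_pos hv]
    rfl
  · have hv' : v ∉ PySem.List.dedup (i, PySem.List.pyGetD mc i []).2 := by
      rw [PySem.List.mem_dedup]; exact hv
    rw [List.count_eq_zero_of_not_mem hv', if_neg hv]
    rfl

theorem pvOcc_keys_nodup (mc : List (List Int)) : (pvOcc mc).keys.Nodup := by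
  rw [pvOcc_eq_foldl]
  exact PySem.Dict.nodup_keys_foldl_modify_key _ _ _ _ _ (by simp [PySem.Dict.keys_empty])

theorem pv_mem_occ_keys (mc : List (List Int)) (v : Int) :
    v ∈ (pvOcc mc).keys ↔ ∃ i ∈ PySem.List.pyRange 0 (pvN mc) 1, v ∈ pvC mc i := by
  rw [pvOcc_eq_foldl,
    PySem.Dict.keys_foldl_modify_key (pvL mc) (fun p => p.1) ([] : List Int)
      (fun _ p => (· ++ [p.2])) PySem.Dict.empty]
  rw [PySem.Dict.keys_empty, PySem.Set.update_nil_left, PySem.Set.mem_ofList]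
  unfold pvL
  rw [PySem.List.enumerate_eq_map_pyRange mc []]
  simp only [List.mem_map, List.mem_flatMap, PySem.List.mem_dedup]
  constructor
  · rintro ⟨p, ⟨q, ⟨i, hi, rfl⟩, a, ha, rfl⟩, rfl⟩
    exact ⟨i, hi, ha⟩
  · rintro ⟨i, hi, hv⟩
    exact ⟨(v, i), ⟨(i, PySem.List.pyGetD mc i []), ⟨i, hi, rfl⟩, ⟨v, hv, rfl⟩⟩, rfl⟩

-- counts characterisation
theorem pv_pyRange_shift (b : Int) :
    PySem.List.pyRange 1 (b + 1) 1 = (PySem.List.pyRange 0 b 1).map (· + 1) := by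
  rw [PySem.List.pyRange_one, PySem.List.pyRange_one, List.map_map]
  have h : (b + 1 - 1).toNat = (b - 0).toNat := by omega
  rw [h]
  apply List.map_congr_left
  intro k _
  simp only [Function.comp_apply]
  omega

theorem pv_pyGetD_cons_succ (x : Int) (t : List Int) (a : Int) (h : 0 ≤ a) :
    PySem.List.pyGetD (x :: t) (a + 1) 0 = PySem.List.pyGetD t a 0 := by
  obtain ⟨k, rfl⟩ : ∃ k : Nat, a = (k : Int) := ⟨a.toNat, by omega⟩
  have h1 : ((k : Int) + 1) = ((k + 1 : Nat) : Int) := by push_cast; ring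
  rw [h1, PySem.List.pyGetD_natCast, PySem.List.pyGetD_natCast, List.getD_cons_succ]

theorem pairsOf_eq_pairsRec (idxs : List Int) : pairsOf idxs = pairsRec idxs := by
  induction idxs with
  | nil =>
    unfold pairsOf pairsRec
    rw [show PySem.List.len ([] : List Int) = 0 from rfl,
      PySem.List.pyRange_one_eq_nil (le_refl 0)]
    rfl
  | cons x t ih =>
    unfold pairsOf pairsRec
    rw [← ih]
    unfold pairsOf
    have hlen : PySem.List.len (x :: t) = (t.length : Int) + 1 := by
      simp [PySem.List.len_eq]
    rw [hlen, PySem.List.pyRange_one_cons (by omega), List.flatMap_cons]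
    congr 1
    · rw [show (0 : Int) + 1 = 1 from rfl, PySem.List.slice_from_one, PySem.List.pyGetD_zero_cons]
      rfl
    · rw [show (0 : Int) + 1 = 1 from rfl, pv_pyRange_shift, List.flatMap_map,
        List.flatMap_def, List.flatMap_def]
      congr 1
      apply List.map_congr_left
      intro a ha
      obtain ⟨ha0, halt⟩ := (PySem.List.mem_pyRange_one).1 ha
      rw [PySem.List.slice_from _ (show (0:Int) ≤ a + 1 + 1 by omega),
        PySem.List.slice_from _ (show (0:Int) ≤ a + 1 by omega)]
      have h1 : (a + 1 + 1).toNat = (a + 1).toNat + 1 := by omega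
      rw [h1, List.drop_succ_cons, pv_pyGetD_cons_succ x t a ha0]

theorem pvCounts_eq_foldl (mc : List (List Int)) :
    pvCounts mc = (pvBL mc).foldl (fun d q => d.modify q 0 (· + 1)) PySem.Dict.empty := by
  unfold pvCounts pvBL
  rw [List.foldl_flatMap]
  apply PySem.List.foldl_congr_mem
  intro acc idxs _
  unfold pairsOf
  rw [List.foldl_flatMap]
  apply PySem.List.foldl_congr_mem
  intro acc2 a _
  rw [List.foldl_map]

theorem pvOcc_values (mc : List (List Int)) :
    (pvOcc mc).values = (pvOcc mc).keys.map (pvIdxs mc) := by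
  have h := PySem.Dict.items_eq_map_keys (pvOcc mc) (pvOcc_keys_nodup mc) []
  simp only [PySem.Dict.values, h, List.map_map]
  exact List.map_congr_left (fun k _ => pvOcc_getD mc k)

theorem pvCounts_getD (mc : List (List Int)) (q : Int × Int) :
    (pvCounts mc).getD q 0 = ((pvBL mc).count q : Int) := by
  rw [pvCounts_eq_foldl, PySem.Dict.getD_foldl_modify_add_one]
  simp [PySem.Dict.getD_empty]

theorem pvCounts_contains (mc : List (List Int)) (q : Int × Int) :
    (pvCounts mc).contains q = true ↔ q ∈ pvBL mc := by
  rw [pvCounts_eq_foldl, PySem.Dict.contains_iff_mem_keys, PySem.Dict.keys_foldl_modify,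
    PySem.Dict.keys_empty, PySem.Set.update_nil_left, PySem.Set.mem_ofList]

-- counting pairs from a strictly increasing index list
theorem pairsRec_count (idxs : List Int) (h : idxs.Pairwise (· < ·)) (i j : Int) (hij : i < j) :
    (pairsRec idxs).count (i, j) = if i ∈ idxs ∧ j ∈ idxs then 1 else 0 := by
  induction idxs with
  | nil => simp [pairsRec]
  | cons x t ih =>
    rw [List.pairwise_cons] at h
    obtain ⟨hx, ht⟩ := h
    have hxt : x ∉ t := fun hm => lt_irrefl x (hx x hm)
    have hnd : t.Nodup := ht.imp (fun hab => ne_of_lt hab)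
    simp only [pairsRec, List.count_append]
    rw [ih ht]
    by_cases hi : i = x
    · subst hi
      have hmapcount : (t.map (fun j' => (i, j'))).count (i, j) = t.count j :=
        List.count_map_of_injective t (fun j' => (i, j')) (fun a b hab => by simpa using hab) j
      rw [hmapcount, if_neg (fun hc => hxt hc.1)]
      by_cases hjt : j ∈ t
      · rw [List.count_eq_one_of_mem hnd hjt,
          if_pos ⟨List.mem_cons_self, List.mem_cons_of_mem _ hjt⟩]
      · rw [List.count_eq_zero_of_not_mem hjt, if_neg]
        rintro ⟨-, hjc⟩
        rcases List.mem_cons.1 hjc with h | h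
        · exact absurd h (by omega)
        · exact hjt h
    · have hmap0 : (t.map (fun j' => (x, j'))).count (i, j) = 0 := by
        rw [List.count_eq_zero]
        intro hm
        rcases List.mem_map.1 hm with ⟨b, -, he⟩
        exact hi (congrArg Prod.fst he).symm
      rw [hmap0]
      by_cases hjx : j = x
      · subst hjx
        have hit : i ∉ t := fun hm => absurd (hx i hm) (by omega)
        rw [if_neg (fun hc => hit hc.1), if_neg]
        rintro ⟨hic, -⟩
        rcases List.mem_cons.1 hic with h | h
        · exact hi h
        · exact hit h
      · have hiff : (i ∈ x :: t ∧ j ∈ x :: t) ↔ (i ∈ t ∧ j ∈ t) := by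
          simp [List.mem_cons, hi, hjx]
        rw [if_congr hiff rfl rfl]
        omega

theorem pvIdxs_pairwise (mc : List (List Int)) (v : Int) : (pvIdxs mc v).Pairwise (· < ·) := by
  exact List.Pairwise.filter _ (PySem.List.pairwise_lt_pyRange_one 0 (pvN mc))

theorem pv_mem_idxs (mc : List (List Int)) (v i : Int) :
    i ∈ pvIdxs mc v ↔ (0 ≤ i ∧ i < pvN mc ∧ v ∈ pvC mc i) := by
  simp [pvIdxs, List.mem_filter, PySem.List.mem_pyRange_one]
  tauto

-- the central counting theorem: B's accumulated count is A's intersection size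
theorem pv_main_getD (mc : List (List Int)) (i j : Int)
    (h0 : 0 ≤ i) (hij : i < j) (hj : j < pvN mc) :
    (pvCounts mc).getD (i, j) 0 = pvInter mc i j := by
  rw [pvCounts_getD]
  unfold pvBL
  rw [pvOcc_values, List.flatMap_map, pv_count_flatMap]
  have hmap : ((pvOcc mc).keys.map (fun v => (pairsOf (pvIdxs mc v)).count (i, j)))
      = ((pvOcc mc).keys.map (fun v => if v ∈ pvC mc i ∧ v ∈ pvC mc j then 1 else 0)) := by
    apply List.map_congr_left
    intro v _
    rw [pairsOf_eq_pairsRec, pairsRec_count _ (pvIdxs_pairwise mc v) i j hij]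
    have hiff : (i ∈ pvIdxs mc v ∧ j ∈ pvIdxs mc v) ↔ (v ∈ pvC mc i ∧ v ∈ pvC mc j) := by
      rw [pv_mem_idxs, pv_mem_idxs]
      constructor
      · rintro ⟨⟨-, -, h1⟩, ⟨-, -, h2⟩⟩; exact ⟨h1, h2⟩
      · rintro ⟨h1, h2⟩; exact ⟨⟨h0, by omega, h1⟩, ⟨by omega, hj, h2⟩⟩
    rw [if_congr hiff rfl rfl]
  rw [hmap, pv_sum_ite_eq_countP, List.countP_eq_length_filter]
  have hperm : ((pvOcc mc).keys.filter (fun v => decide (v ∈ pvC mc i ∧ v ∈ pvC mc j))).Perm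
      ((PySem.Set.ofList (pvC mc i)).filter (fun x => (PySem.Set.ofList (pvC mc j)).contains x)) := by
    apply (List.perm_ext_iff_of_nodup
      (List.Nodup.filter _ (pvOcc_keys_nodup mc))
      (List.Nodup.filter _ (PySem.Set.nodup_ofList _))).2
    intro v
    rw [List.mem_filter, List.mem_filter, pv_mem_occ_keys]
    simp only [PySem.Set.mem_ofList, PySem.Set.contains_iff, decide_eq_true_eq]
    constructor
    · rintro ⟨-, h1, h2⟩; exact ⟨h1, h2⟩
    · rintro ⟨h1, h2⟩
      exact ⟨⟨i, (PySem.List.mem_pyRange_one).2 ⟨h0, by omega⟩, h1⟩, h1, h2⟩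
  simp only [pvInter, PySem.Set.inter, PySem.List.len_eq]
  rw [hperm.length_eq]


theorem pv_main_contains (mc : List (List Int)) (i j : Int)
    (h0 : 0 ≤ i) (hij : i < j) (hj : j < pvN mc) :
    ((pvCounts mc).contains (i, j) = true) ↔ 0 < pvInter mc i j := by
  have hg := pv_main_getD mc i j h0 hij hj
  rw [pvCounts_getD] at hg
  rw [pvCounts_contains, ← List.count_pos_iff]
  omega

-- A's program, rephrased: pairwise intersection edges in (i, j) order, then the final sort
theorem pvA_eq (mc : List (List Int)) :
    build_graph_of_cliques mc =
      PySem.List.sorted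
        ((PySem.List.pyRange 0 (pvN mc - 1) 1).flatMap (fun i =>
          ((PySem.List.pyRange (i + 1) (pvN mc) 1).filter
              (fun j => decide (pvInter mc i j > 0))).map
            (fun j => (pvC mc i, pvC mc j, pvInter mc i j))))
        (fun node => node.2.2) true := by
  show PySem.List.sorted
      ((PySem.List.pyRange 0 (pvN mc - 1) 1).foldl (fun C i =>
        (PySem.List.pyRange (i + 1) (pvN mc) 1).foldl (fun C j =>
          if pvInter mc i j > 0 then C ++ [(pvC mc i, pvC mc j, pvInter mc i j)] else C) C) [])
      (fun node => node.2.2) true = _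
  congr 1
  rw [PySem.List.foldl_congr_mem _ _
      (fun C i => C ++ ((PySem.List.pyRange (i + 1) (pvN mc) 1).filter
          (fun j => decide (pvInter mc i j > 0))).map
        (fun j => (pvC mc i, pvC mc j, pvInter mc i j))) _
      (fun acc i _ => PySem.List.foldl_append_ite (fun j => pvInter mc i j > 0) _ _ _),
    PySem.List.foldl_append_eq_flatMap, List.nil_append]

-- B's program, rephrased: the same pair sweep, reading the accumulated counts dict
theorem pvB_eq (mc : List (List Int)) :
    build_graph_of_cliques_alt mc =
      PySem.List.sorted
        ((PySem.List.pyRange 0 (pvN mc - 1) 1).flatMap (fun i =>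
          ((PySem.List.pyRange (i + 1) (pvN mc) 1).filter
              (fun j => decide ((pvCounts mc).contains (i, j) = true))).map
            (fun j => (pvC mc i, pvC mc j, (pvCounts mc).getD (i, j) 0))))
        (fun node => node.2.2) true := by
  show PySem.List.sorted
      ((PySem.List.pyRange 0 (pvN mc - 1) 1).foldl (fun C i =>
        (PySem.List.pyRange (i + 1) (pvN mc) 1).foldl (fun C j =>
          if (pvCounts mc).contains (i, j) = true then
            C ++ [(pvC mc i, pvC mc j, (pvCounts mc).getD (i, j) 0)] else C) C) [])
      (fun node => node.2.2) true = _
  congr 1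
  rw [PySem.List.foldl_congr_mem _ _
      (fun C i => C ++ ((PySem.List.pyRange (i + 1) (pvN mc) 1).filter
          (fun j => decide ((pvCounts mc).contains (i, j) = true))).map
        (fun j => (pvC mc i, pvC mc j, (pvCounts mc).getD (i, j) 0))) _
      (fun acc i _ => PySem.List.foldl_append_ite (fun j => (pvCounts mc).contains (i, j) = true) _ _ _),
    PySem.List.foldl_append_eq_flatMap, List.nil_append]

-- ===== VERDICT (by name: the statement is the Claim_ definition above) =====
theorem build_graph_of_cliques_spec : Claim_equal_build_graph_of_cliques := by
  intro mc _
  unfold Spec_build_graph_of_cliques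
  rw [pvA_eq, pvB_eq]
  congr 1
  rw [List.flatMap_def, List.flatMap_def]
  congr 1
  apply List.map_congr_left
  intro i hi
  obtain ⟨hi0, hilt⟩ := (PySem.List.mem_pyRange_one).1 hi
  have hfil : (PySem.List.pyRange (i + 1) (pvN mc) 1).filter
        (fun j => decide (pvInter mc i j > 0))
      = (PySem.List.pyRange (i + 1) (pvN mc) 1).filter
        (fun j => decide ((pvCounts mc).contains (i, j) = true)) := by
    apply List.filter_congr
    intro j hj
    obtain ⟨hj1, hj2⟩ := (PySem.List.mem_pyRange_one).1 hj
    rw [decide_eq_decide]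
    exact (pv_main_contains mc i j hi0 (by omega) hj2).symm
  rw [← hfil]
  apply List.map_congr_left
  intro j hjm
  obtain ⟨hj1, hj2⟩ := (PySem.List.mem_pyRange_one).1 (List.mem_filter.1 hjm).1
  rw [pv_main_getD mc i j hi0 (by omega) hj2]
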